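-- pv_equiv track=rewrite | github.com/bskthefirst/billpdfeditor | backend/exact_export_server.py | _guess_base14_font
-- ===== SOURCE A (Python) =====
-- def _guess_base14_font(font_family: str, font_weight: str, font_style: str) -> str:
--     family = str(font_family or "").lower()
--     weight = str(font_weight or "").lower()
--     style = str(font_style or "").lower()
--     is_bold = "bold" in weight or (weight.isdigit() and int(weight) >= 600)
--     is_italic = "italic" in style or "oblique" in style
--
--     if any(token in family for token in ["times", "serif", "georgia", "cambria"]):
--         if is_bold and is_italic:
--             return "Times-BoldItalic"
--         if is_bold:
--             return "Times-Bold"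
--         if is_italic:
--             return "Times-Italic"
--         return "Times-Roman"
--     if any(token in family for token in ["courier", "mono", "consolas"]):
--         if is_bold and is_italic:
--             return "Courier-BoldOblique"
--         if is_bold:
--             return "Courier-Bold"
--         if is_italic:
--             return "Courier-Oblique"
--         return "Courier"
--     if is_bold and is_italic:
--         return "Helvetica-BoldOblique"
--     if is_bold:
--         return "Helvetica-Bold"
--     if is_italic:
--         return "Helvetica-Oblique"
--     return "Helvetica"
-- ===== SOURCE B (Python) =====
-- # B synthesizes the font name compositionally (base + "-" + "Bold"+slant suffix,
-- # with Times' "Roman"/"Italic" quirks handled by per-family slant/plain fields)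
-- # instead of returning one of twelve literal names; the family is found by one
-- # scan of a flat token->family list.
--
-- _TOKEN_FAMILY = [
--     ("times", "Times"), ("serif", "Times"), ("georgia", "Times"), ("cambria", "Times"),
--     ("courier", "Courier"), ("mono", "Courier"), ("consolas", "Courier"),
-- ]
--
-- # family -> (slant word, plain-variant full name)
-- _FAMILY_RULES = {
--     "Times": ("Italic", "Times-Roman"),
--     "Courier": ("Oblique", "Courier"),
--     "Helvetica": ("Oblique", "Helvetica"),
-- }
--
-- def _guess_base14_font(font_family: str, font_weight: str, font_style: str) -> str:
--     family = str(font_family or "").lower()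
--     weight = str(font_weight or "").lower()
--     style = str(font_style or "").lower()
--     is_bold = "bold" in weight or (weight.isdigit() and int(weight) >= 600)
--     is_italic = "italic" in style or "oblique" in style
--
--     base = "Helvetica"
--     for token, fam in _TOKEN_FAMILY:
--         if token in family:
--             base = fam
--             break
--
--     slant, plain = _FAMILY_RULES[base]
--     suffix = ("Bold" if is_bold else "") + (slant if is_italic else "")
--     return base + "-" + suffix if suffix else plain
-- ===== Notes on version B (the rewrite author's own statement) =====
-- stated objective: alternative
-- what changed: Instead of twelve literal return branches, B synthesizes the name compositionally as base + '-' + ('Bold'?)+(slant?) with a per-family (slant, plain-name) rule table, and picks the family by one scan of a flat token->family list rather than nested any()-over-token-lists branches.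
import Mathlib
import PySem

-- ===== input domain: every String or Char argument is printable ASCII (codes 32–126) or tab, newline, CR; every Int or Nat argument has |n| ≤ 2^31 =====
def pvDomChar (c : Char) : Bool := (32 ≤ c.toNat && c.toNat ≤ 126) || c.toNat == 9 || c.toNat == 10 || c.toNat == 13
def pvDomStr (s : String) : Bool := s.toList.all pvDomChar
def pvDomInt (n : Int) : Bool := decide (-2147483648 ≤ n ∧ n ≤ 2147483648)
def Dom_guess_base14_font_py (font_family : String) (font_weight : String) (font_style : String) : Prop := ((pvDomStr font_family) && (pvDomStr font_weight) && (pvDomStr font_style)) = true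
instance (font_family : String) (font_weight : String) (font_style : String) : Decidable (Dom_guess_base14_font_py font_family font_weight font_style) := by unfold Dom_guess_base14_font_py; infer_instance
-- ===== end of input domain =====

-- B synthesizes the name compositionally (base + "-" + Bold/slant suffix, with a per-family
-- (slant, plain) rule table) and finds the family by one scan of a flat token→family list;
-- same cost as A's nested branch chain, a different decomposition.


-- ===== PORT A =====
-- literal transliteration of _guess_base14_font: lowercase, compute flags, nested return chain.
-- ('font_family or ""' and str(...) are identity on strings, since only "" is falsy.)
def guess_base14_font_py (font_family : String) (font_weight : String) (font_style : String) : String :=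
  let family := PySem.Str.lower font_family
  let weight := PySem.Str.lower font_weight
  let style := PySem.Str.lower font_style
  let is_bold := PySem.Str.isIn "bold" weight ||
    (PySem.Str.strIsdigit weight && decide (600 ≤ (PySem.Int.ofStr? weight).getD 0))
  let is_italic := PySem.Str.isIn "italic" style || PySem.Str.isIn "oblique" style
  if (["times", "serif", "georgia", "cambria"].any (fun t => PySem.Str.isIn t family)) then
    if is_bold && is_italic then "Times-BoldItalic"
    else if is_bold then "Times-Bold"
    else if is_italic then "Times-Italic"
    else "Times-Roman"
  else if (["courier", "mono", "consolas"].any (fun t => PySem.Str.isIn t family)) then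
    if is_bold && is_italic then "Courier-BoldOblique"
    else if is_bold then "Courier-Bold"
    else if is_italic then "Courier-Oblique"
    else "Courier"
  else
    if is_bold && is_italic then "Helvetica-BoldOblique"
    else if is_bold then "Helvetica-Bold"
    else if is_italic then "Helvetica-Oblique"
    else "Helvetica"

-- ===== PORT B =====
-- Source B's flat ordered token→family list
def pvTokenFamily : List (String × String) :=
  [("times", "Times"), ("serif", "Times"), ("georgia", "Times"), ("cambria", "Times"),
   ("courier", "Courier"), ("mono", "Courier"), ("consolas", "Courier")]

-- Source B's _FAMILY_RULES: family → (slant word, plain-variant full name)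
def pvFamilyRules : PySem.Dict String (String × String) :=
  PySem.Dict.ofList
    [("Times", ("Italic", "Times-Roman")),
     ("Courier", ("Oblique", "Courier")),
     ("Helvetica", ("Oblique", "Helvetica"))]

-- Source B's 'for token, fam in _TOKEN_FAMILY: if token in family: base = fam; break'
def pvFindBase : List (String × String) → String → String
  | [], _ => "Helvetica"
  | (t, fam) :: rest, family =>
      if PySem.Str.isIn t family then fam else pvFindBase rest family

def guess_base14_font_py_alt (font_family : String) (font_weight : String) (font_style : String) : String :=
  let family := PySem.Str.lower font_family
  let weight := PySem.Str.lower font_weight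
  let style := PySem.Str.lower font_style
  let is_bold := PySem.Str.isIn "bold" weight ||
    (PySem.Str.strIsdigit weight && decide (600 ≤ (PySem.Int.ofStr? weight).getD 0))
  let is_italic := PySem.Str.isIn "italic" style || PySem.Str.isIn "oblique" style
  let base := pvFindBase pvTokenFamily family
  let rule := (pvFamilyRules.get? base).getD ("", "")
  let suffix := (if is_bold then "Bold" else "") ++ (if is_italic then rule.1 else "")
  if suffix ≠ "" then base ++ "-" ++ suffix else rule.2

-- ===== PRECONDITION & SPEC =====
def Spec_guess_base14_font_py (font_family : String) (font_weight : String) (font_style : String) (out : String) : Prop := out = guess_base14_font_py_alt font_family font_weight font_style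
instance (font_family : String) (font_weight : String) (font_style : String) (out : String) : Decidable (Spec_guess_base14_font_py font_family font_weight font_style out) := by unfold Spec_guess_base14_font_py; infer_instance

-- ===== CLAIM (what is proved, stated in full; the proofs are below) =====
def Claim_equal_guess_base14_font_py : Prop := ∀ (font_family : String) (font_weight : String) (font_style : String), Dom_guess_base14_font_py font_family font_weight font_style → Spec_guess_base14_font_py font_family font_weight font_style (guess_base14_font_py font_family font_weight font_style)

-- ===== LEMMAS AND PROOFS =====
-- B's single flat scan picks exactly the family A's two grouped any()-scans pick.
lemma pvFindBase_char (fam : String) :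
    pvFindBase pvTokenFamily fam =
      (if (["times", "serif", "georgia", "cambria"].any (fun t => PySem.Str.isIn t fam)) then "Times"
       else if (["courier", "mono", "consolas"].any (fun t => PySem.Str.isIn t fam)) then "Courier"
       else "Helvetica") := by
  cases h1 : PySem.Str.isIn "times" fam <;>
  cases h2 : PySem.Str.isIn "serif" fam <;>
  cases h3 : PySem.Str.isIn "georgia" fam <;>
  cases h4 : PySem.Str.isIn "cambria" fam <;>
  cases h5 : PySem.Str.isIn "courier" fam <;>
  cases h6 : PySem.Str.isIn "mono" fam <;>
  cases h7 : PySem.Str.isIn "consolas" fam <;>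
  simp_all [pvTokenFamily, pvFindBase]

-- ===== VERDICT (by name: the statement is the Claim_ definition above) =====
theorem guess_base14_font_py_spec : Claim_equal_guess_base14_font_py := by
  intro ff fw fs _
  unfold Spec_guess_base14_font_py guess_base14_font_py guess_base14_font_py_alt
  dsimp only
  rw [pvFindBase_char]
  cases h1 : (["times", "serif", "georgia", "cambria"].any
      (fun t => PySem.Str.isIn t (PySem.Str.lower ff))) <;>
  cases h2 : (["courier", "mono", "consolas"].any
      (fun t => PySem.Str.isIn t (PySem.Str.lower ff))) <;>
  cases hb1 : PySem.Str.isIn "bold" (PySem.Str.lower fw) <;>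
  cases hb2 : (PySem.Str.strIsdigit (PySem.Str.lower fw) &&
      decide (600 ≤ (PySem.Int.ofStr? (PySem.Str.lower fw)).getD 0)) <;>
  cases hi : (PySem.Str.isIn "italic" (PySem.Str.lower fs) ||
      PySem.Str.isIn "oblique" (PySem.Str.lower fs)) <;>
  (try simp only [h1, h2, hb1, hb2, hi]) <;> decide
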